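-- pv_equiv track=rewrite | github.com/FoodieFridays/partitions-test | young_diagram.py | get_multiplicity_vector
-- ===== SOURCE A (Python) =====
-- def multiplicity_of_idx(i, array):
--     return array.count(array[i])
--
-- def get_multiplicity_vector(array):
--     array.sort(reverse=True)
--     lamb = "("
--
--     # Using our above multiplicity function to generate the multiplicity vector
--     for i in range(len(array)):
--         if i == 0:
--             lamb += str(array[i]) + "^" + str(multiplicity_of_idx(i, array))
--         elif array[i] != array[i - 1]:
--             if i == len(array) - 1:
--                 lamb += ", " + str(array[i]) + "^" + str(multiplicity_of_idx(i, array))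
--             else:
--                 lamb += ", " + str(array[i]) + "^" + str(multiplicity_of_idx(i, array))
--
--     lamb += ")"
--
--     return lamb
-- ===== SOURCE B (Python) =====
-- def get_multiplicity_vector(array):
--     # Sort descending (in place, like the original), then one linear pass
--     # over consecutive equal runs: no per-element count() scan.
--     array.sort(reverse=True)
--     parts = []
--     prev = None
--     count = 0
--     for x in array:
--         if count and x == prev:
--             count += 1
--         else:
--             if count:
--                 parts.append(str(prev) + "^" + str(count))
--             prev = x
--             count = 1
--     if count:
--         parts.append(str(prev) + "^" + str(count))
--     return "(" + ", ".join(parts) + ")"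
-- ===== Notes on version B (the rewrite author's own statement) =====
-- stated objective: faster
-- what changed: Replaces the per-run array.count() scan (a full pass for every run start) by a single linear pass over the sorted array that counts consecutive equal runs and joins the pieces at the end.
import Mathlib
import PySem

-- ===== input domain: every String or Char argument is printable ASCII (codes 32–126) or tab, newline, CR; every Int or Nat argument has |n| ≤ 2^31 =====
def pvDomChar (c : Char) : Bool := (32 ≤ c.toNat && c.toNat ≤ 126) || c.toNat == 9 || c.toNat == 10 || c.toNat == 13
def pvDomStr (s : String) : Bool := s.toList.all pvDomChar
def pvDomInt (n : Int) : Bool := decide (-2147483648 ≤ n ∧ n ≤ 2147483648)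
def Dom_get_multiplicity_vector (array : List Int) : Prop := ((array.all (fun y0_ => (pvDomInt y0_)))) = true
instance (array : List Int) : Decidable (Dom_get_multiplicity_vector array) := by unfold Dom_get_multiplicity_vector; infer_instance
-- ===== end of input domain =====

-- ===== PORT A =====
-- B is a single linear pass over the sorted array; A calls array.count at every run start.
-- Python A sorts its argument in place; the equivalence proved here is about the return value.
-- String building is ported on List Char (PySem.Chars) and wrapped with String.ofList at the end.

def multiplicity_of_idx (i : Int) (array : List Int) : Int :=
  ((PySem.List.count array (PySem.List.pyGetD array i 0) : Nat) : Int)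

def get_multiplicity_vector (array : List Int) : String :=
  let s := PySem.List.sorted array (fun x => x) true
  let lamb : List Char :=
    (PySem.List.pyRange 0 (PySem.List.len s) 1).foldl (fun lamb i =>
      if i = 0 then
        lamb ++ PySem.Int.toChars (PySem.List.pyGetD s i 0) ++ ['^'] ++
          PySem.Int.toChars (multiplicity_of_idx i s)
      else if PySem.List.pyGetD s i 0 ≠ PySem.List.pyGetD s (i - 1) 0 then
        if i = PySem.List.len s - 1 then
          lamb ++ [',', ' '] ++ PySem.Int.toChars (PySem.List.pyGetD s i 0) ++ ['^'] ++
            PySem.Int.toChars (multiplicity_of_idx i s)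
        else
          lamb ++ [',', ' '] ++ PySem.Int.toChars (PySem.List.pyGetD s i 0) ++ ['^'] ++
            PySem.Int.toChars (multiplicity_of_idx i s)
      else lamb) ['(']
  String.ofList (lamb ++ [')'])

-- ===== PORT B =====
-- str(prev) + "^" + str(count); prev is only read when count ≠ 0, where it is some _.
def pvEntryB (prev : Option Int) (count : Int) : List Char :=
  PySem.Int.toChars (prev.getD 0) ++ '^' :: PySem.Int.toChars count

-- the trailing 'if count: parts.append(str(prev) + "^" + str(count))' flush
def pvFin (st : List (List Char) × Option Int × Int) : List (List Char) :=
  if st.2.2 ≠ 0 then st.1 ++ [pvEntryB st.2.1 st.2.2] else st.1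

def get_multiplicity_vector_alt (array : List Int) : String :=
  let s := PySem.List.sorted array (fun x => x) true
  let st : List (List Char) × Option Int × Int :=
    s.foldl (fun st x =>
      let (parts, prev, count) := st
      if count ≠ 0 ∧ some x = prev then
        (parts, prev, count + 1)
      else
        ((if count ≠ 0 then parts ++ [pvEntryB prev count] else parts), some x, 1))
      ([], none, 0)
  let parts := pvFin st
  String.ofList ('(' :: PySem.Chars.join [',', ' '] parts ++ [')'])

-- ===== PRECONDITION & SPEC =====
def Spec_get_multiplicity_vector (array : List Int) (out : String) : Prop := out = get_multiplicity_vector_alt array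
instance (array : List Int) (out : String) : Decidable (Spec_get_multiplicity_vector array out) := by unfold Spec_get_multiplicity_vector; infer_instance

-- ===== CLAIM (what is proved, stated in full; the proofs are below) =====
def Claim_equal_get_multiplicity_vector : Prop := ∀ (array : List Int), Dom_get_multiplicity_vector array → Spec_get_multiplicity_vector array (get_multiplicity_vector array)

-- ===== LEMMAS AND PROOFS =====

-- "v^c" as characters
def pvEnt (v c : Int) : List Char := PySem.Int.toChars v ++ '^' :: PySem.Int.toChars c

-- A's loop tail (indices ≥ 1), relative to the full sorted list s (global counts)
def pvGA (s : List Int) (prev : Int) : List Int → List Char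
  | [] => []
  | y :: u =>
      (if y ≠ prev then [',', ' '] ++ pvEnt y ((s.count y : Nat) : Int) else []) ++ pvGA s y u

-- the same tail with run-local counts
def pvFB (prev : Int) : List Int → List Char
  | [] => []
  | y :: u =>
      (if y ≠ prev then [',', ' '] ++ pvEnt y (((y :: u).count y : Nat) : Int) else []) ++ pvFB y u

-- the list of entries B's loop produces, given an open run (prev, c)
def pvEB (prev c : Int) : List Int → List (List Char)
  | [] => [pvEnt prev c]
  | y :: u => if y = prev then pvEB prev (c + 1) u else pvEnt prev c :: pvEB y 1 u

theorem pvEB_ne_nil (u : List Int) (prev c : Int) : pvEB prev c u ≠ [] := by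
  induction u generalizing prev c with
  | nil => simp [pvEB]
  | cons y u ih => by_cases h : y = prev <;> simp [pvEB, h, ih]

-- A's index fold over range(k+1, len(s)) is pvGA on the suffix
theorem pvFoldA (s : List Int) (d : List Int) : ∀ (k : Nat) (acc : List Char),
    s.drop (k + 1) = d →
    (PySem.List.pyRange ((k : Int) + 1) (PySem.List.len s) 1).foldl (fun lamb i =>
      if i = 0 then
        lamb ++ PySem.Int.toChars (PySem.List.pyGetD s i 0) ++ ['^'] ++
          PySem.Int.toChars (multiplicity_of_idx i s)
      else if PySem.List.pyGetD s i 0 ≠ PySem.List.pyGetD s (i - 1) 0 then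
        if i = PySem.List.len s - 1 then
          lamb ++ [',', ' '] ++ PySem.Int.toChars (PySem.List.pyGetD s i 0) ++ ['^'] ++
            PySem.Int.toChars (multiplicity_of_idx i s)
        else
          lamb ++ [',', ' '] ++ PySem.Int.toChars (PySem.List.pyGetD s i 0) ++ ['^'] ++
            PySem.Int.toChars (multiplicity_of_idx i s)
      else lamb) acc
    = acc ++ pvGA s (s.getD k 0) d := by
  induction d with
  | nil =>
    intro k acc hd
    have hlen : s.length ≤ k + 1 := by
      by_contra h
      exact absurd hd (by simp [List.drop_eq_nil_iff]; omega)
    rw [PySem.List.pyRange_one_eq_nil (by simp; exact_mod_cast hlen)]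
    simp [pvGA]
  | cons y d' ih =>
    intro k acc hd
    have hlt : k + 1 < s.length := by
      by_contra h
      rw [List.drop_eq_nil_iff.2 (by omega)] at hd
      simp at hd
    have hget : s.getD (k + 1) 0 = y := by
      have h0 : s[k + 1]? = (s.drop (k + 1))[0]? := by
        rw [List.getElem?_drop]
      rw [hd] at h0
      simp [List.getD, h0]
    have hd' : s.drop (k + 2) = d' := by
      have h2 : s.drop (k + 2) = (s.drop (k + 1)).drop 1 := by rw [List.drop_drop]
      rw [h2, hd]; simp
    have hgetI : PySem.List.pyGetD s ((k : Int) + 1) 0 = y := by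
      rw [show ((k : Int) + 1) = ((k + 1 : Nat) : Int) by push_cast; ring,
        PySem.List.pyGetD_natCast, hget]
    have hprevI : PySem.List.pyGetD s ((k : Int) + 1 - 1) 0 = s.getD k 0 := by
      rw [show ((k : Int) + 1 - 1) = ((k : Nat) : Int) by ring, PySem.List.pyGetD_natCast]
    have hm : multiplicity_of_idx ((k : Int) + 1) s = ((s.count y : Nat) : Int) := by
      rw [multiplicity_of_idx, hgetI, PySem.List.count_eq, List.count]
    rw [PySem.List.pyRange_one_cons (by simp; exact_mod_cast hlt)]
    rw [List.foldl_cons]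
    have hne0 : ¬ ((k : Int) + 1 = 0) := by omega
    rw [if_neg hne0, ite_self, hgetI, hprevI, hm]
    by_cases hy : y = s.getD k 0
    · rw [if_neg (by simp [hy])]
      have hstep := ih (k + 1) acc hd'
      rw [show (((k + 1 : Nat) : Int) + 1) = ((k : Int) + 1 + 1) by push_cast; ring,
        hget] at hstep
      rw [hstep]
      have hy' : y = s[k]?.getD 0 := by simpa [List.getD] using hy
      simp [pvGA, ← hy']
    · rw [if_pos (by simpa using hy)]
      have hinit : acc ++ [',', ' '] ++ PySem.Int.toChars y ++ ['^'] ++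
          PySem.Int.toChars ((s.count y : Nat) : Int)
          = acc ++ ([',', ' '] ++ pvEnt y ((s.count y : Nat) : Int)) := by
        simp [pvEnt]
      have hstep := ih (k + 1)
        (acc ++ ([',', ' '] ++ pvEnt y ((s.count y : Nat) : Int))) hd'
      rw [show (((k + 1 : Nat) : Int) + 1) = ((k : Int) + 1 + 1) by push_cast; ring,
        hget] at hstep
      rw [hinit, hstep]
      have hy' : ¬ y = s[k]?.getD 0 := by simpa [List.getD] using hy
      simp [pvGA, hy']

-- global counts reduce to run-local counts on a sorted list
theorem pvGA_eq_pvFB : ∀ (u pre : List Int) (prev : Int),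
    (∀ a ∈ pre, prev ≤ a) → (∀ b ∈ u, b ≤ prev) →
    u.Pairwise (fun a b => b ≤ a) →
    pvGA (pre ++ u) prev u = pvFB prev u := by
  intro u
  induction u with
  | nil => intro pre prev _ _ _; rfl
  | cons y u' ih =>
    intro pre prev hpre hle hpw
    obtain ⟨hley, hpw'⟩ := List.pairwise_cons.1 hpw
    have hsplit : pre ++ y :: u' = (pre ++ [y]) ++ u' := by simp
    by_cases hy : y = prev
    · subst hy
      rw [pvGA, pvFB, if_neg (by simp), if_neg (by simp)]
      rw [hsplit]
      exact ih (pre ++ [y]) y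
        (by intro a ha; rcases List.mem_append.1 ha with h | h
            · have := hpre a h; omega
            · simp at h; omega)
        hley hpw'
    · have hylt : y < prev := lt_of_le_of_ne (hle y (by simp)) hy
      have hcnt : (pre ++ y :: u').count y = (y :: u').count y := by
        rw [List.count_append, List.count_eq_zero.2 ?_, Nat.zero_add]
        intro hmem
        have := hpre y hmem
        omega
      rw [pvGA, pvFB, if_pos (by simpa using hy), if_pos (by simpa using hy), hcnt]
      rw [hsplit]
      congr 1
      exact ih (pre ++ [y]) y
        (by intro a ha; rcases List.mem_append.1 ha with h | h
            · have := hpre a h; omega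
            · simp at h; omega)
        hley hpw'

-- B's element fold with an open run (prev, c ≥ 1) produces pvEB
theorem pvFoldB : ∀ (u : List Int) (parts : List (List Char)) (prev c : Int), 1 ≤ c →
    pvFin (u.foldl (fun st x =>
      let (parts, prev, count) := st
      if count ≠ 0 ∧ some x = prev then
        (parts, prev, count + 1)
      else
        ((if count ≠ 0 then parts ++ [pvEntryB prev count] else parts), some x, 1))
      (parts, some prev, c))
    = parts ++ pvEB prev c u := by
  intro u
  induction u with
  | nil =>
    intro parts prev c hc
    simp [pvFin, pvEB, pvEntryB, pvEnt, show c ≠ 0 by omega]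
  | cons x u' ih =>
    intro parts prev c hc
    rw [List.foldl_cons]
    dsimp only
    by_cases hx : x = prev
    · rw [if_pos ⟨by omega, by rw [hx]⟩]
      rw [ih parts prev (c + 1) (by omega)]
      rw [pvEB, if_pos hx]
    · rw [if_neg (by rintro ⟨-, h⟩; exact hx (Option.some.inj h)), if_pos (by omega)]
      rw [ih (parts ++ [pvEntryB (some prev) c]) x 1 le_rfl]
      rw [pvEB, if_neg hx]
      simp [pvEntryB, pvEnt]

-- joining B's entries gives the head entry followed by the run-local tail
theorem pvJoinEB : ∀ (u : List Int) (prev c : Int),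
    (∀ b ∈ u, b ≤ prev) → u.Pairwise (fun a b => b ≤ a) →
    PySem.Chars.join [',', ' '] (pvEB prev c u)
    = pvEnt prev (c + ((u.count prev : Nat) : Int)) ++ pvFB prev u := by
  intro u
  induction u with
  | nil => intro prev c _ _; simp [pvEB, pvFB, PySem.Chars.join_singleton]
  | cons y u' ih =>
    intro prev c hle hpw
    obtain ⟨hley, hpw'⟩ := List.pairwise_cons.1 hpw
    by_cases hy : y = prev
    · rw [pvEB, if_pos hy, pvFB, if_neg (by simp [hy])]
      rw [ih prev (c + 1) (by intro b hb; exact le_of_le_of_eq (hley b hb) hy) (by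
        subst hy; exact hpw')]
      subst hy
      rw [List.count_cons_self]
      congr 2
      push_cast
      ring
    · have hylt : y < prev := lt_of_le_of_ne (hle y (by simp)) hy
      have hnm : prev ∉ y :: u' := by
        intro hmem
        rcases List.mem_cons.1 hmem with h | h
        · omega
        · have := hley prev h
          omega
      rw [pvEB, if_neg hy, pvFB, if_pos (by simpa using hy)]
      obtain ⟨q, rest, hq⟩ := List.exists_cons_of_ne_nil (pvEB_ne_nil u' y 1)
      rw [hq, PySem.Chars.join_cons_cons, ← hq]
      rw [ih y 1 hley hpw']
      rw [List.count_eq_zero.2 hnm, List.count_cons_self]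
      have h1 : (1 : Int) + ((u'.count y : Nat) : Int) = (((u'.count y + 1 : Nat)) : Int) := by
        push_cast; ring
      rw [h1]
      simp

-- ===== VERDICT (by name: the statement is the Claim_ definition above) =====
theorem get_multiplicity_vector_spec : Claim_equal_get_multiplicity_vector := by
  intro array _
  unfold Spec_get_multiplicity_vector
  simp only [get_multiplicity_vector, get_multiplicity_vector_alt]
  generalize hS : PySem.List.sorted array (fun x => x) true = s
  have hpw : s.Pairwise (fun a b => b ≤ a) := by
    rw [← hS]
    simpa using PySem.List.sorted_pairwise_rev array (fun x => x)
  cases s with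
  | nil => rfl
  | cons x t =>
    obtain ⟨hxt, hpwt⟩ := List.pairwise_cons.1 hpw
    -- A side: peel i = 0, then pvFoldA + pvGA_eq_pvFB
    have hlen0 : (0 : Int) < PySem.List.len (x :: t) := by
      simp
    rw [PySem.List.pyRange_one_cons hlen0, List.foldl_cons, if_pos rfl,
      PySem.List.pyGetD_zero_cons]
    have hm0 : multiplicity_of_idx 0 (x :: t) = (((x :: t).count x : Nat) : Int) := by
      rw [multiplicity_of_idx, PySem.List.pyGetD_zero_cons, PySem.List.count_eq, List.count]
    rw [hm0]
    have hA := pvFoldA (x :: t) t 0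
      (['('] ++ PySem.Int.toChars x ++ ['^'] ++ PySem.Int.toChars (((x :: t).count x : Nat) : Int))
      (by simp)
    rw [show (((0 : Nat) : Int) + 1) = (0 : Int) + 1 by norm_num] at hA
    rw [show ((x :: t).getD 0 0) = x from rfl] at hA
    rw [hA]
    have hGA : pvGA (x :: t) x t = pvFB x t := by
      have := pvGA_eq_pvFB t [x] x (by simp) hxt hpwt
      simpa using this
    rw [hGA]
    -- B side: first element opens the run, then pvFoldB + pvJoinEB
    rw [List.foldl_cons]
    dsimp only
    rw [if_neg (by rintro ⟨h, -⟩; exact h rfl), if_neg (by simp)]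
    rw [pvFoldB t [] x 1 le_rfl, List.nil_append,
      pvJoinEB t x 1 hxt hpwt]
    -- both sides are now "(x^count) ++ run-local tail"
    have hcnt : (((x :: t).count x : Nat) : Int) = 1 + ((t.count x : Nat) : Int) := by
      rw [List.count_cons_self]
      push_cast
      ring
    rw [hcnt]
    simp [pvEnt]
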